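-- pv_equiv track=rewrite | github.com/RustedPaladin/chess_fraud_analysis_by_stockfish | game_classes.py | clear_string
-- ===== SOURCE A (Python) =====
-- def clear_string(string):
--     new_string = str('')
--     take = True
--     for s in string:
--         if s == '{':
--             take = False
--         if s == '}':
--             take = True
--         if take == True:
--             new_string += s
--     new_string = new_string.replace('}', '')
--     return new_string
-- ===== SOURCE B (Python) =====
-- def clear_string(string):
--     out = []
--     rest = string
--     while '{' in rest:
--         before, _, after = rest.partition('{')
--         out.append(before)
--         _, rb, rest = after.partition('}')
--         if not rb:
--             rest = ''
--     out.append(rest)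
--     return ''.join(out).replace('}', '')
-- ===== Notes on version B (the rewrite author's own statement) =====
-- stated objective: faster
-- what changed: Replaced A's per-character take/skip flag loop with string concatenation by an iterative partition-jump scan that copies the text before each open brace and jumps past the matching close brace, then strips stray close braces; the jumps and joins run as C-level substring operations instead of per-character Python work.
import Mathlib
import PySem

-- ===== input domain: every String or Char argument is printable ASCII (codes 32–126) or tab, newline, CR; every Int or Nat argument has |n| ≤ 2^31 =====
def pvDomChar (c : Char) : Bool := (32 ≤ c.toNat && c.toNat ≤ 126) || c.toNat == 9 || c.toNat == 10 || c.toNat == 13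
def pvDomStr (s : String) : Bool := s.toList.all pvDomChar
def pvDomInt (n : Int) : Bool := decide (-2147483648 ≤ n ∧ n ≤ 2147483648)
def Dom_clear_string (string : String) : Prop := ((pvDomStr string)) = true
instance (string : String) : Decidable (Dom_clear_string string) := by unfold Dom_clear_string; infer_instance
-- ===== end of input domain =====

-- B replaces A's per-character take/skip flag loop by an iterative partition-jump scan
-- (jump to the next '{', then past the next '}').

-- ===== PORT A =====
-- A's loop: for each char, update the take flag, append the char when take is true;
-- then .replace('}','') — ported as a filter, exact since a single char is replaced by ''.
def clear_string (string : String) : String :=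
  let st := string.toList.foldl
    (fun (st : List Char × Bool) s =>
      let take := if s = '{' then false else st.2
      let take := if s = '}' then true else take
      (if take then st.1 ++ [s] else st.1, take))
    ([], true)
  String.mk (st.1.filter (fun c => c ≠ '}'))

-- ===== PORT B =====
-- termination fact for the loop below: jumping past the found '{' strictly shrinks `rest`
theorem pv_drop_brace_shrink (rest : List Char) (h : '{' ∈ rest) :
    ((rest.dropWhile (· ≠ '{')).drop 1).length < rest.length := by
  have h1 : rest.dropWhile (· ≠ '{') ≠ [] := by
    intro hnil
    have := (List.dropWhile_eq_nil_iff).1 hnil '{' h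
    simp at this
  have h2 : (rest.dropWhile (· ≠ '{')).length ≤ rest.length := List.length_dropWhile_le _ _
  have h3 : 0 < (rest.dropWhile (· ≠ '{')).length := List.length_pos_of_ne_nil h1
  simp only [List.length_drop]
  omega

-- Source B's while loop over a shrinking `rest`; `'{' in rest` → membership (exact for a 1-char
-- needle), rest.partition(c) → (takeWhile (· ≠ c), found?, dropWhile (· ≠ c) |>.drop 1), exact.
def clear_string_go (rest : List Char) (out : List Char) : List Char :=
  if h : '{' ∈ rest then
    let before := rest.takeWhile (· ≠ '{')
    let after := (rest.dropWhile (· ≠ '{')).drop 1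
    let rest' := if '}' ∈ after then (after.dropWhile (· ≠ '}')).drop 1 else []
    clear_string_go rest' (out ++ before)
  else out ++ rest
termination_by rest.length
decreasing_by
  have key := pv_drop_brace_shrink rest h
  split
  · have h2 := List.length_dropWhile_le (fun c => decide (c ≠ '}')) ((rest.dropWhile (· ≠ '{')).drop 1)
    simp only [List.length_drop] at *
    omega
  · simpa using List.length_pos_of_mem h

def clear_string_alt (string : String) : String :=
  String.mk ((clear_string_go string.toList []).filter (fun c => c ≠ '}'))

-- ===== PRECONDITION & SPEC =====
def Spec_clear_string (string : String) (out : String) : Prop := out = clear_string_alt string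
instance (string : String) (out : String) : Decidable (Spec_clear_string string out) := by unfold Spec_clear_string; infer_instance

-- ===== CLAIM (what is proved, stated in full; the proofs are below) =====
def Claim_equal_clear_string : Prop := ∀ (string : String), Dom_clear_string string → Spec_clear_string string (clear_string string)

-- ===== LEMMAS AND PROOFS =====

-- what A's flag loop emits, read off the loop body
def gA : Bool → List Char → List Char
  | _, [] => []
  | take, s :: cs =>
      let take := if s = '{' then false else take
      let take := if s = '}' then true else take
      (if take then [s] else []) ++ gA take cs

theorem foldA (cs : List Char) : ∀ (acc : List Char) (take : Bool),
    (cs.foldl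
      (fun (st : List Char × Bool) s =>
        let take := if s = '{' then false else st.2
        let take := if s = '}' then true else take
        (if take then st.1 ++ [s] else st.1, take))
      (acc, take)).1 = acc ++ gA take cs := by
  induction cs with
  | nil => intro acc take; simp [gA]
  | cons c cs ih =>
      intro acc take
      simp only [List.foldl_cons, gA]
      rw [ih]
      split_ifs <;> simp

theorem gA_true_prefix (before rest : List Char) (h : '{' ∉ before) :
    gA true (before ++ rest) = before ++ gA true rest := by
  induction before with
  | nil => rfl
  | cons c cs ih =>
      simp only [List.mem_cons, not_or] at h
      have hc : ¬ c = '{' := fun hc => h.1 hc.symm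
      simp only [List.cons_append, gA, hc, if_false]
      split_ifs <;> simp_all [ih h.2]

theorem gA_false_skip (mid rest : List Char) (h : '}' ∉ mid) :
    gA false (mid ++ rest) = gA false rest := by
  induction mid with
  | nil => rfl
  | cons c cs ih =>
      simp only [List.mem_cons, not_or] at h
      have hc : ¬ c = '}' := fun hc => h.1 hc.symm
      simp only [List.cons_append, gA, hc, if_false]
      split_ifs <;> simp_all [ih h.2]

theorem gA_lbrace (cs : List Char) : gA true ('{' :: cs) = gA false cs := by
  simp [gA]

theorem gA_rbrace (cs : List Char) : gA false ('}' :: cs) = '}' :: gA true cs := by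
  simp [gA]

-- split a list at the first occurrence of c
theorem split_at_mem {c : Char} {l : List Char} (h : c ∈ l) :
    l = l.takeWhile (· ≠ c) ++ c :: (l.dropWhile (· ≠ c)).drop 1 ∧ c ∉ l.takeWhile (· ≠ c) := by
  induction l with
  | nil => simp at h
  | cons a t ih =>
      by_cases hac : a = c
      · subst hac
        simp [List.takeWhile_cons, List.dropWhile_cons]
      · have hct : c ∈ t := by
          rcases List.mem_cons.1 h with h' | h'
          · exact absurd h'.symm hac
          · exact h'
        obtain ⟨h1, h2⟩ := ih hct
        constructor
        · simp only [List.takeWhile_cons, List.dropWhile_cons]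
          have : ¬ a = c := hac
          simp only [this, ne_eq, decide_not, decide_false, Bool.not_false, if_true]
          conv_lhs => rw [h1]
          simp [this]
        · simp only [List.takeWhile_cons]
          have hca : ¬ c = a := fun hh => hac hh.symm
          have : ¬ a = c := hac
          simp only [this, ne_eq, decide_not, decide_false, Bool.not_false, if_true, List.mem_cons,
            not_or]
          exact ⟨hca, by simpa using h2⟩

theorem go_acc : ∀ (n : Nat) (rest : List Char), rest.length ≤ n → ∀ (out : List Char),
    clear_string_go rest out = out ++ clear_string_go rest [] := by
  intro n
  induction n with
  | zero =>
      intro rest h out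
      have : rest = [] := List.eq_nil_of_length_eq_zero (Nat.le_zero.1 h)
      subst this
      simp [clear_string_go]
  | succ n ih =>
      intro rest h out
      rw [clear_string_go]
      conv_rhs => rw [clear_string_go]
      by_cases hmem : '{' ∈ rest
      · simp only [dif_pos hmem]
        have key := pv_drop_brace_shrink rest hmem
        have hlen : (if '}' ∈ (rest.dropWhile (· ≠ '{')).drop 1 then
            (((rest.dropWhile (· ≠ '{')).drop 1).dropWhile (· ≠ '}')).drop 1 else []).length ≤ n := by
          split
          · have := List.length_dropWhile_le (fun c => decide (c ≠ '}')) ((rest.dropWhile (· ≠ '{')).drop 1)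
            simp only [List.length_drop] at *
            omega
          · simp
        simp only [ne_eq, decide_not, List.drop_one] at hlen ⊢
        rw [ih _ hlen (out ++ rest.takeWhile (fun x => !decide (x = '{'))),
          ih _ hlen ([] ++ rest.takeWhile (fun x => !decide (x = '{')))]
        simp
      · simp [hmem]

theorem main_lemma : ∀ (n : Nat) (cs : List Char), cs.length ≤ n →
    (gA true cs).filter (fun c => c ≠ '}') = (clear_string_go cs []).filter (fun c => c ≠ '}') := by
  intro n
  induction n with
  | zero =>
      intro cs h
      have : cs = [] := List.eq_nil_of_length_eq_zero (Nat.le_zero.1 h)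
      subst this
      rw [clear_string_go]
      simp [gA]
  | succ n ih =>
      intro cs h
      rw [clear_string_go]
      by_cases hmem : '{' ∈ cs
      · simp only [dif_pos hmem]
        obtain ⟨hsplit, hnb⟩ := split_at_mem hmem
        set before := cs.takeWhile (· ≠ '{') with hb
        set after := (cs.dropWhile (· ≠ '{')).drop 1 with ha
        have hg : gA true cs = before ++ gA false after := by
          conv_lhs => rw [hsplit]
          rw [gA_true_prefix _ _ hnb, gA_lbrace]
        by_cases hr : '}' ∈ after
        · simp only [if_pos hr]
          obtain ⟨hsplit2, hnb2⟩ := split_at_mem hr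
          set rest' := (after.dropWhile (· ≠ '}')).drop 1 with hr'
          have hg2 : gA false after = '}' :: gA true rest' := by
            conv_lhs => rw [hsplit2]
            rw [gA_false_skip _ _ hnb2, gA_rbrace]
          have hlen : rest'.length ≤ n := by
            have key := pv_drop_brace_shrink cs hmem
            have h2 := List.length_dropWhile_le (fun c => decide (c ≠ '}')) after
            simp only [hr', ha, List.length_drop] at *
            omega
          simp only [List.nil_append]
          rw [go_acc n rest' hlen before]
          rw [hg, hg2]
          simp only [List.nil_append, List.filter_append, List.filter_cons]
          rw [ih rest' hlen]
          simp
        · simp only [if_neg hr]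
          have hg2 : gA false after = [] := by
            have : after = after ++ [] := by simp
            rw [this, gA_false_skip _ _ hr]
            rfl
          rw [clear_string_go]
          simp [hg, hg2]
      · simp only [dif_neg hmem]
        have : gA true cs = cs := by
          have : cs = cs ++ [] := by simp
          rw [this, gA_true_prefix _ _ hmem]
          rfl
        simp [this]

-- ===== VERDICT (by name: the statement is the Claim_ definition above) =====
theorem clear_string_spec : Claim_equal_clear_string := by
  intro s _
  unfold Spec_clear_string clear_string clear_string_alt
  simp only []
  rw [foldA]
  simp only [List.nil_append]
  rw [main_lemma s.toList.length s.toList (le_refl _)]
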